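-- pv_equiv track=rewrite | github.com/gschizas/retrodev | png2plus/png2plus.py | convierte_graficos
-- ===== SOURCE A (Python) =====
-- def convierte_graficos(cadena, ppb):
--     """
--     Convierte una cadena de bytes a un modo del CPC
--     """
--     cadena_final = ""
--     for i in range(len(cadena) // ppb):
--         if ppb == 2:
--             byte_tmp0 = ord(cadena[i * ppb])
--             byte_tmp1 = ord(cadena[i * ppb + 1])
--             # p1b3->b0 p1b2->b4
--             # p1b1->b2 p1b0->b6
--             # p0b3->b1 p0b2->b5
--             # p0b1->b3 p0b0->b7
--             byte_tmp = chr(((byte_tmp1 & 0x08) >> 3) | ((byte_tmp1 & 0x04) << 2) | \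
--                         ((byte_tmp1 & 0x02) << 1) | ((byte_tmp1 & 0x01) << 6) | \
--                         ((byte_tmp0 & 0x08) >> 2) | ((byte_tmp0 & 0x04) << 3) | \
--                         ((byte_tmp0 & 0x02) << 2) | ((byte_tmp0 & 0x01) << 7))
--         elif ppb == 4:
--             byte_tmp0 = ord(cadena[i * ppb])
--             byte_tmp1 = ord(cadena[i * ppb + 1])
--             byte_tmp2 = ord(cadena[i * ppb + 2])
--             byte_tmp3 = ord(cadena[i * ppb + 3])
--             # p3b1->b0 p3b0->b4
--             # p2b1->b1 p2b0->b5
--             # p1b1->b2 p1b0->b6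
--             # p0b1->b3 p0b0->b7
--             byte_tmp = chr(((byte_tmp3 & 0x02) >> 1) | ((byte_tmp3 & 0x01) << 4) | \
--                         ((byte_tmp2 & 0x02)) | ((byte_tmp2 & 0x01) << 5) | \
--                         ((byte_tmp1 & 0x02) << 1) | ((byte_tmp1 & 0x01) << 6) | \
--                         ((byte_tmp0 & 0x02) << 2) | ((byte_tmp0 & 0x01) << 7))
--         elif ppb == 8:
--             byte_tmp0 = ord(cadena[i * ppb])
--             byte_tmp1 = ord(cadena[i * ppb + 1])
--             byte_tmp2 = ord(cadena[i * ppb + 2])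
--             byte_tmp3 = ord(cadena[i * ppb + 3])
--             byte_tmp4 = ord(cadena[i * ppb + 4])
--             byte_tmp5 = ord(cadena[i * ppb + 5])
--             byte_tmp6 = ord(cadena[i * ppb + 6])
--             byte_tmp7 = ord(cadena[i * ppb + 7])
--             # p7b0->b0 p6b0->b1
--             # p5b0->b2 p4b0->b3
--             # p3b0->b4 p2b0->b5
--             # p1b0->b6 p0b0->b7
--             byte_tmp = chr(((byte_tmp7 & 0x01)) | ((byte_tmp6 & 0x01) << 1) | \
--                         ((byte_tmp5 & 0x01) << 2) | ((byte_tmp4 & 0x01) << 3) | \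
--                         ((byte_tmp3 & 0x01) << 4) | ((byte_tmp2 & 0x01) << 5) | \
--                         ((byte_tmp1 & 0x01) << 6) | ((byte_tmp0 & 0x01) << 7))
--         cadena_final = cadena_final + byte_tmp
--     return cadena_final
-- ===== SOURCE B (Python) =====
-- # Data-driven rewrite: one table of (source_bit, dest_bit_for_pixel_0) per ppb;
-- # nested loops over pixel positions OR contributions into each output byte.
-- _PLACE = {2: [(3, 1), (2, 5), (1, 3), (0, 7)],
--           4: [(1, 3), (0, 7)],
--           8: [(0, 7)]}
--
--
-- def convierte_graficos(cadena, ppb):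
--     place = _PLACE.get(ppb)
--     out = []
--     for g in range(len(cadena) // ppb):
--         byte = 0
--         for p in range(ppb):
--             v = ord(cadena[g * ppb + p])
--             for src, dst in place:
--                 byte |= ((v >> src) & 1) << (dst - p)
--         out.append(chr(byte))
--     return "".join(out)
-- ===== Notes on version B (the rewrite author's own statement) =====
-- stated objective: alternative
-- what changed: Replaces A's three hard-coded per-ppb bit-shuffle branches by a single data-driven pass: a table of (source-bit, destination-bit) pairs per ppb, with nested loops over pixel positions OR-ing each pixel's contributions into the output byte, collected via a list join.
-- outside the precondition, e.g. on convierte_graficos('abc', 0): A raises ZeroDivisionError, B raises ZeroDivisionError; on convierte_graficos('abcde', 5): A raises UnboundLocalError, B raises TypeError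
import Mathlib
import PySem

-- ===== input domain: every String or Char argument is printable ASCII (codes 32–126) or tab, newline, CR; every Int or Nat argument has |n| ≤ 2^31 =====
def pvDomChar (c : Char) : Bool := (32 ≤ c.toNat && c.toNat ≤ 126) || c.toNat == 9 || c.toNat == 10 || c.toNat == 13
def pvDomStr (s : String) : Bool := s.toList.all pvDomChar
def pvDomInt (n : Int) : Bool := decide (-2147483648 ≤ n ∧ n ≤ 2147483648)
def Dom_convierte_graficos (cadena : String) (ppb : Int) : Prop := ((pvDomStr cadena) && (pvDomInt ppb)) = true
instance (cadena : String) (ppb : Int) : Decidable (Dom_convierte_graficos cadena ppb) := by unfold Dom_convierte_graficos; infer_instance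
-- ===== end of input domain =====

-- B replaces A's three hard-coded bit-shuffle branches by one data-driven pass over a
-- (source-bit, destination-bit) table per ppb (objective: alternative decomposition).
-- Python strings are modelled as List Char; the return-string build-up is modelled by list append.

-- ===== PORT A =====
-- ord(cadena[idx]); whenever the loop body runs under Pre_, idx is in range (the none default is never hit)
def pvOrd (s : List Char) (i : Int) : Nat :=
  match PySem.List.pyGet? s i with
  | some c => c.toNat
  | none => 0

def convierte_graficos (cadena : String) (ppb : Int) : String :=
  let s := cadena.toList
  -- len(cadena) // ppb; ppb = 0 (ZeroDivisionError in A) is excluded by Pre_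
  let n : Int := if ppb = 0 then 0 else PySem.Int.floordiv (s.length : Int) ppb
  let step := fun (acc : List Char) (i : Int) =>
    if ppb = 2 then
      let b0 := pvOrd s (i * ppb); let b1 := pvOrd s (i * ppb + 1)
      acc ++ [Char.ofNat ((b1 &&& 8) >>> 3 ||| (b1 &&& 4) <<< 2 |||
                          (b1 &&& 2) <<< 1 ||| (b1 &&& 1) <<< 6 |||
                          (b0 &&& 8) >>> 2 ||| (b0 &&& 4) <<< 3 |||
                          (b0 &&& 2) <<< 2 ||| (b0 &&& 1) <<< 7)]
    else if ppb = 4 then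
      let b0 := pvOrd s (i * ppb); let b1 := pvOrd s (i * ppb + 1)
      let b2 := pvOrd s (i * ppb + 2); let b3 := pvOrd s (i * ppb + 3)
      acc ++ [Char.ofNat ((b3 &&& 2) >>> 1 ||| (b3 &&& 1) <<< 4 |||
                          (b2 &&& 2) ||| (b2 &&& 1) <<< 5 |||
                          (b1 &&& 2) <<< 1 ||| (b1 &&& 1) <<< 6 |||
                          (b0 &&& 2) <<< 2 ||| (b0 &&& 1) <<< 7)]
    else if ppb = 8 then
      let b0 := pvOrd s (i * ppb); let b1 := pvOrd s (i * ppb + 1)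
      let b2 := pvOrd s (i * ppb + 2); let b3 := pvOrd s (i * ppb + 3)
      let b4 := pvOrd s (i * ppb + 4); let b5 := pvOrd s (i * ppb + 5)
      let b6 := pvOrd s (i * ppb + 6); let b7 := pvOrd s (i * ppb + 7)
      acc ++ [Char.ofNat ((b7 &&& 1) ||| (b6 &&& 1) <<< 1 |||
                          (b5 &&& 1) <<< 2 ||| (b4 &&& 1) <<< 3 |||
                          (b3 &&& 1) <<< 4 ||| (b2 &&& 1) <<< 5 |||
                          (b1 &&& 1) <<< 6 ||| (b0 &&& 1) <<< 7)]
    else acc  -- byte_tmp is unbound here: A raises UnboundLocalError; Pre_ excludes reaching this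
  String.ofList ((PySem.List.pyRange 0 n 1).foldl step [])

-- ===== PORT B =====
-- _PLACE.get(ppb): (source_bit, dest_bit_for_pixel_0) pairs; [] models None, which
-- Python B only ever iterates when a full group exists (it raises TypeError there, outside Pre_)
def pvPlace (ppb : Int) : List (Nat × Nat) :=
  if ppb = 2 then [(3, 1), (2, 5), (1, 3), (0, 7)]
  else if ppb = 4 then [(1, 3), (0, 7)]
  else if ppb = 8 then [(0, 7)]
  else []

def convierte_graficos_alt (cadena : String) (ppb : Int) : String :=
  let s := cadena.toList
  let place := pvPlace ppb
  -- len(cadena) // ppb; ppb = 0 (ZeroDivisionError in Python B too) is excluded by Pre_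
  let n : Int := if ppb = 0 then 0 else PySem.Int.floordiv (s.length : Int) ppb
  let group := fun (g : Int) =>
    (List.range ppb.toNat).foldl
      (fun (byte : Nat) (p : Nat) =>
        let v := pvOrd s (g * ppb + (p : Int))
        place.foldl (fun b sd => b ||| ((v >>> sd.1) &&& 1) <<< (sd.2 - p)) byte)
      0
  String.ofList ((PySem.List.pyRange 0 n 1).map (fun g => Char.ofNat (group g)))

-- ===== PRECONDITION & SPEC =====
-- Pre_ excludes exactly the inputs where A raises: ppb = 0 (ZeroDivisionError) and any other
-- ppb outside {2,4,8} for which at least one full group exists (UnboundLocalError).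
def Pre_convierte_graficos (cadena : String) (ppb : Int) : Prop :=
  ppb = 2 ∨ ppb = 4 ∨ ppb = 8 ∨ ppb < 0 ∨ (0 < ppb ∧ (cadena.toList.length : Int) < ppb)
instance (cadena : String) (ppb : Int) : Decidable (Pre_convierte_graficos cadena ppb) := by
  unfold Pre_convierte_graficos; infer_instance

def pvWitness_convierte_graficos : String × Int := ("ab", 2)

def Spec_convierte_graficos (cadena : String) (ppb : Int) (out : String) : Prop := out = convierte_graficos_alt cadena ppb
instance (cadena : String) (ppb : Int) (out : String) : Decidable (Spec_convierte_graficos cadena ppb out) := by unfold Spec_convierte_graficos; infer_instance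

-- ===== CLAIM (what is proved, stated in full; the proofs are below) =====
def Claim_equal_convierte_graficos : Prop := ∀ (cadena : String) (ppb : Int), Dom_convierte_graficos cadena ppb → Pre_convierte_graficos cadena ppb → Spec_convierte_graficos cadena ppb (convierte_graficos cadena ppb)

-- ===== LEMMAS AND PROOFS =====

-- v &&& 2^s isolates bit s: it equals the 0/1 bit (v >>> s) &&& 1 put back at position s
theorem pvMask (v s : Nat) : v &&& 2 ^ s = ((v >>> s) &&& 1) <<< s := by
  rw [Nat.and_two_pow, Nat.shiftLeft_eq, Nat.and_one_is_mod, Nat.shiftRight_eq_div_pow]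
  rcases Nat.mod_two_eq_zero_or_one (v / 2 ^ s) with h | h <;> simp [Nat.testBit, Nat.shiftRight_eq_div_pow, h]

theorem pvEmpty (n : Int) (hn : n ≤ 0) : PySem.List.pyRange 0 n 1 = [] := by
  rw [PySem.List.pyRange_one]
  simp
  omega

theorem pvNonposDiv (a b : Int) (ha : 0 ≤ a) (hb : b < 0) : PySem.Int.floordiv a b ≤ 0 := by
  have h := PySem.Int.floordiv_mul_add_mod a b
  have hm := PySem.Int.mod_neg_bounds a hb
  by_contra hq
  replace hq : 0 < PySem.Int.floordiv a b := by omega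
  nlinarith [mul_neg_of_pos_of_neg hq hb, hm.2]

theorem pvMask8 (v : Nat) : v &&& 8 = (v >>> 3 &&& 1) <<< 3 := pvMask v 3
theorem pvMask4 (v : Nat) : v &&& 4 = (v >>> 2 &&& 1) <<< 2 := pvMask v 2
theorem pvMask2 (v : Nat) : v &&& 2 = (v >>> 1 &&& 1) <<< 1 := pvMask v 1

-- the three per-group byte identities: A's inline shuffle = B's table-driven OR of single bits
theorem pvByte2 (x y : Nat) :
    (y &&& 8) >>> 3 ||| (y &&& 4) <<< 2 ||| (y &&& 2) <<< 1 ||| (y &&& 1) <<< 6 |||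
      (x &&& 8) >>> 2 ||| (x &&& 4) <<< 3 ||| (x &&& 2) <<< 2 ||| (x &&& 1) <<< 7 =
    0 ||| (x >>> 3 &&& 1) <<< 1 ||| (x >>> 2 &&& 1) <<< 5 ||| (x >>> 1 &&& 1) <<< 3 ||| (x &&& 1) <<< 7 |||
      (y >>> 3 &&& 1) <<< (1 - 1) ||| (y >>> 2 &&& 1) <<< (5 - 1) ||| (y >>> 1 &&& 1) <<< (3 - 1) |||
      (y &&& 1) <<< (7 - 1) := by
  rw [pvMask8 x, pvMask4 x, pvMask2 x, pvMask8 y, pvMask4 y, pvMask2 y]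
  have hx3 : x >>> 3 &&& 1 = 0 ∨ x >>> 3 &&& 1 = 1 := by have := Nat.and_le_right (n := x >>> 3) (m := 1); omega
  have hx2 : x >>> 2 &&& 1 = 0 ∨ x >>> 2 &&& 1 = 1 := by have := Nat.and_le_right (n := x >>> 2) (m := 1); omega
  have hx1 : x >>> 1 &&& 1 = 0 ∨ x >>> 1 &&& 1 = 1 := by have := Nat.and_le_right (n := x >>> 1) (m := 1); omega
  have hx0 : x &&& 1 = 0 ∨ x &&& 1 = 1 := by have := Nat.and_le_right (n := x) (m := 1); omega
  have hy3 : y >>> 3 &&& 1 = 0 ∨ y >>> 3 &&& 1 = 1 := by have := Nat.and_le_right (n := y >>> 3) (m := 1); omega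
  have hy2 : y >>> 2 &&& 1 = 0 ∨ y >>> 2 &&& 1 = 1 := by have := Nat.and_le_right (n := y >>> 2) (m := 1); omega
  have hy1 : y >>> 1 &&& 1 = 0 ∨ y >>> 1 &&& 1 = 1 := by have := Nat.and_le_right (n := y >>> 1) (m := 1); omega
  have hy0 : y &&& 1 = 0 ∨ y &&& 1 = 1 := by have := Nat.and_le_right (n := y) (m := 1); omega
  rcases hx3 with h|h <;> rw [h] <;> clear h <;>
  rcases hx2 with h|h <;> rw [h] <;> clear h <;>
  rcases hx1 with h|h <;> rw [h] <;> clear h <;>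
  rcases hx0 with h|h <;> rw [h] <;> clear h <;>
  rcases hy3 with h|h <;> rw [h] <;> clear h <;>
  rcases hy2 with h|h <;> rw [h] <;> clear h <;>
  rcases hy1 with h|h <;> rw [h] <;> clear h <;>
  rcases hy0 with h|h <;> rw [h] <;> clear h <;> decide

theorem pvByte4 (x y z w : Nat) :
    (w &&& 2) >>> 1 ||| (w &&& 1) <<< 4 ||| z &&& 2 ||| (z &&& 1) <<< 5 |||
      (y &&& 2) <<< 1 ||| (y &&& 1) <<< 6 ||| (x &&& 2) <<< 2 ||| (x &&& 1) <<< 7 =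
    0 ||| (x >>> 1 &&& 1) <<< 3 ||| (x &&& 1) <<< 7 |||
      (y >>> 1 &&& 1) <<< (3 - 1) ||| (y &&& 1) <<< (7 - 1) |||
      (z >>> 1 &&& 1) <<< (3 - 2) ||| (z &&& 1) <<< (7 - 2) |||
      (w >>> 1 &&& 1) <<< (3 - 3) ||| (w &&& 1) <<< (7 - 3) := by
  rw [pvMask2 x, pvMask2 y, pvMask2 z, pvMask2 w]
  have hx1 : x >>> 1 &&& 1 = 0 ∨ x >>> 1 &&& 1 = 1 := by have := Nat.and_le_right (n := x >>> 1) (m := 1); omega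
  have hx0 : x &&& 1 = 0 ∨ x &&& 1 = 1 := by have := Nat.and_le_right (n := x) (m := 1); omega
  have hy1 : y >>> 1 &&& 1 = 0 ∨ y >>> 1 &&& 1 = 1 := by have := Nat.and_le_right (n := y >>> 1) (m := 1); omega
  have hy0 : y &&& 1 = 0 ∨ y &&& 1 = 1 := by have := Nat.and_le_right (n := y) (m := 1); omega
  have hz1 : z >>> 1 &&& 1 = 0 ∨ z >>> 1 &&& 1 = 1 := by have := Nat.and_le_right (n := z >>> 1) (m := 1); omega
  have hz0 : z &&& 1 = 0 ∨ z &&& 1 = 1 := by have := Nat.and_le_right (n := z) (m := 1); omega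
  have hw1 : w >>> 1 &&& 1 = 0 ∨ w >>> 1 &&& 1 = 1 := by have := Nat.and_le_right (n := w >>> 1) (m := 1); omega
  have hw0 : w &&& 1 = 0 ∨ w &&& 1 = 1 := by have := Nat.and_le_right (n := w) (m := 1); omega
  rcases hx1 with h|h <;> rw [h] <;> clear h <;>
  rcases hx0 with h|h <;> rw [h] <;> clear h <;>
  rcases hy1 with h|h <;> rw [h] <;> clear h <;>
  rcases hy0 with h|h <;> rw [h] <;> clear h <;>
  rcases hz1 with h|h <;> rw [h] <;> clear h <;>
  rcases hz0 with h|h <;> rw [h] <;> clear h <;>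
  rcases hw1 with h|h <;> rw [h] <;> clear h <;>
  rcases hw0 with h|h <;> rw [h] <;> clear h <;> decide

theorem pvByte8 (x0 x1 x2 x3 x4 x5 x6 x7 : Nat) :
    x7 &&& 1 ||| (x6 &&& 1) <<< 1 ||| (x5 &&& 1) <<< 2 ||| (x4 &&& 1) <<< 3 |||
      (x3 &&& 1) <<< 4 ||| (x2 &&& 1) <<< 5 ||| (x1 &&& 1) <<< 6 ||| (x0 &&& 1) <<< 7 =
    0 ||| (x0 &&& 1) <<< 7 ||| (x1 &&& 1) <<< (7 - 1) ||| (x2 &&& 1) <<< (7 - 2) |||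
      (x3 &&& 1) <<< (7 - 3) ||| (x4 &&& 1) <<< (7 - 4) ||| (x5 &&& 1) <<< (7 - 5) |||
      (x6 &&& 1) <<< (7 - 6) ||| (x7 &&& 1) <<< (7 - 7) := by
  have h0 : x0 &&& 1 = 0 ∨ x0 &&& 1 = 1 := by have := Nat.and_le_right (n := x0) (m := 1); omega
  have h1 : x1 &&& 1 = 0 ∨ x1 &&& 1 = 1 := by have := Nat.and_le_right (n := x1) (m := 1); omega
  have h2 : x2 &&& 1 = 0 ∨ x2 &&& 1 = 1 := by have := Nat.and_le_right (n := x2) (m := 1); omega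
  have h3 : x3 &&& 1 = 0 ∨ x3 &&& 1 = 1 := by have := Nat.and_le_right (n := x3) (m := 1); omega
  have h4 : x4 &&& 1 = 0 ∨ x4 &&& 1 = 1 := by have := Nat.and_le_right (n := x4) (m := 1); omega
  have h5 : x5 &&& 1 = 0 ∨ x5 &&& 1 = 1 := by have := Nat.and_le_right (n := x5) (m := 1); omega
  have h6 : x6 &&& 1 = 0 ∨ x6 &&& 1 = 1 := by have := Nat.and_le_right (n := x6) (m := 1); omega
  have h7 : x7 &&& 1 = 0 ∨ x7 &&& 1 = 1 := by have := Nat.and_le_right (n := x7) (m := 1); omega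
  rcases h0 with h|h <;> rw [h] <;> clear h <;>
  rcases h1 with h|h <;> rw [h] <;> clear h <;>
  rcases h2 with h|h <;> rw [h] <;> clear h <;>
  rcases h3 with h|h <;> rw [h] <;> clear h <;>
  rcases h4 with h|h <;> rw [h] <;> clear h <;>
  rcases h5 with h|h <;> rw [h] <;> clear h <;>
  rcases h6 with h|h <;> rw [h] <;> clear h <;>
  rcases h7 with h|h <;> rw [h] <;> clear h <;> decide


-- ===== VERDICT (the statement is the Claim_ definition above) =====
theorem convierte_graficos_spec : Claim_equal_convierte_graficos := by
  intro cadena ppb _hdom hpre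
  unfold Spec_convierte_graficos convierte_graficos convierte_graficos_alt
  rcases hpre with h|h|h|h|h
  · subst h
    simp only [pvPlace, if_true, reduceIte]
    rw [PySem.List.foldl_append_singleton_eq_map]
    rw [List.nil_append]
    apply congrArg String.ofList
    apply List.map_congr_left
    intro i _
    apply congrArg Char.ofNat
    have h2 : Int.toNat 2 = 2 := rfl
    rw [h2]
    simp only [List.range_succ, List.range_zero, List.nil_append, List.cons_append,
      List.foldl_cons, List.foldl_nil, Nat.cast_zero, Nat.cast_one, add_zero,
      Nat.shiftRight_zero, Nat.sub_zero, Nat.shiftLeft_zero]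
    exact pvByte2 (pvOrd cadena.toList (i * 2)) (pvOrd cadena.toList (i * 2 + 1))
  · subst h
    simp only [pvPlace, if_true, reduceIte, if_neg (by norm_num : (4:Int) ≠ 2), if_neg (by norm_num : (4:Int) ≠ 0)]
    rw [PySem.List.foldl_append_singleton_eq_map]
    rw [List.nil_append]
    apply congrArg String.ofList
    apply List.map_congr_left
    intro i _
    apply congrArg Char.ofNat
    have h4 : Int.toNat 4 = 4 := rfl
    rw [h4]
    simp only [List.range_succ, List.range_zero, List.nil_append, List.cons_append,
      List.foldl_cons, List.foldl_nil, Nat.cast_zero, Nat.cast_one, Nat.cast_ofNat, add_zero,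
      Nat.shiftRight_zero, Nat.sub_zero, Nat.shiftLeft_zero]
    exact pvByte4 (pvOrd cadena.toList (i * 4)) (pvOrd cadena.toList (i * 4 + 1))
      (pvOrd cadena.toList (i * 4 + 2)) (pvOrd cadena.toList (i * 4 + 3))
  · subst h
    simp only [pvPlace, if_true, reduceIte, if_neg (by norm_num : (8:Int) ≠ 2),
      if_neg (by norm_num : (8:Int) ≠ 4), if_neg (by norm_num : (8:Int) ≠ 0)]
    rw [PySem.List.foldl_append_singleton_eq_map]
    rw [List.nil_append]
    apply congrArg String.ofList
    apply List.map_congr_left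
    intro i _
    apply congrArg Char.ofNat
    have h8 : Int.toNat 8 = 8 := rfl
    rw [h8]
    simp only [List.range_succ, List.range_zero, List.nil_append, List.cons_append,
      List.foldl_cons, List.foldl_nil, Nat.cast_zero, Nat.cast_one, Nat.cast_ofNat, add_zero,
      Nat.shiftRight_zero, Nat.sub_zero, Nat.shiftLeft_zero]
    exact pvByte8 (pvOrd cadena.toList (i * 8)) (pvOrd cadena.toList (i * 8 + 1))
      (pvOrd cadena.toList (i * 8 + 2)) (pvOrd cadena.toList (i * 8 + 3))
      (pvOrd cadena.toList (i * 8 + 4)) (pvOrd cadena.toList (i * 8 + 5))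
      (pvOrd cadena.toList (i * 8 + 6)) (pvOrd cadena.toList (i * 8 + 7))
  · -- ppb < 0: len // ppb ≤ 0, the loop body never runs, both return ""
    have hne : ppb ≠ 0 := by omega
    simp only [if_neg hne]
    have hn : PySem.Int.floordiv (cadena.toList.length : Int) ppb ≤ 0 :=
      pvNonposDiv _ _ (Int.natCast_nonneg _) h
    rw [pvEmpty _ hn]
    rfl
  · -- 0 < ppb, len < ppb: len // ppb = 0, both return ""
    obtain ⟨hpos, hlt⟩ := h
    have hne : ppb ≠ 0 := by omega
    simp only [if_neg hne]
    have hn : PySem.Int.floordiv (cadena.toList.length : Int) ppb = 0 := by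
      rw [PySem.Int.floordiv_eq_ediv_of_pos hpos]
      exact Int.ediv_eq_zero_of_lt (Int.natCast_nonneg _) hlt
    rw [hn, pvEmpty 0 le_rfl]
    rfl
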